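-- pv_equiv track=rewrite | github.com/rojter-tech/number_theory | utils/ntools.py | fib_pair
-- ===== SOURCE A (Python) =====
-- def fib_pair(n):
--     """Returns the tuple (F(n), F(n+1)).
--
--     Arguments:
--         n {int} -- n'th fibonacci number
--     """
--     if n == 0:
--         return (0, 1)
--     else:
--         a, b = fib_pair(n // 2)
--         c = a * (b * 2 - a)
--         d = a * a + b * b
--         if n % 2 == 0:
--             return (c, d)
--         else:
--             return (d, c + d)
-- ===== SOURCE B (Python) =====
-- def fib_pair(n):
--     """Returns the tuple (F(n), F(n+1)) by an iterative fast-doubling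
--     loop over the bits of n from most to least significant."""
--     a, b = 0, 1
--     m = max(n, 0)
--     for i in range(m.bit_length() - 1, -1, -1):
--         c = a * (2 * b - a)
--         d = a * a + b * b
--         if (m >> i) & 1:
--             a, b = d, c + d
--         else:
--             a, b = c, d
--     return (a, b)
-- ===== Notes on version B (the rewrite author's own statement) =====
-- stated objective: alternative
-- what changed: Replaced A's recursive fast-doubling (recurse on n//2, combine on return) with an iterative fast-doubling loop that scans the bits of n from most-significant to least-significant, maintaining (F(v), F(v+1)) for the bit-prefix v.
import Mathlib
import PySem

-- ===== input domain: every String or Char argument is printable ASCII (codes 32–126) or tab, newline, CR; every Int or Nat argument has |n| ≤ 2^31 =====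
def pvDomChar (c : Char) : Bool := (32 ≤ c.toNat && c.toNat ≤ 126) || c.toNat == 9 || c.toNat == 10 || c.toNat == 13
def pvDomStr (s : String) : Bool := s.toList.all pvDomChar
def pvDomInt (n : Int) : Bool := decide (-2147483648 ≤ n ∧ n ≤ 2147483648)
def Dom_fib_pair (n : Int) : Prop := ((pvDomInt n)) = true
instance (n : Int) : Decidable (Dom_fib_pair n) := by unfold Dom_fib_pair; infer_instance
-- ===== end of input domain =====

-- B replaces A's recursion on n//2 by a loop over n's bits from most- to least-significant (alternative decomposition).

-- ===== PORT A =====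
-- A recurses on n // 2 down to its base case; on negative n Python A never reaches it
-- (RecursionError), so the port guards with n ≤ 0 purely for totality (excluded by Pre_).
def fib_pair (n : Int) : Int × Int :=
  if _h : n ≤ 0 then (0, 1)
  else
    let p := fib_pair (PySem.Int.floordiv n 2)
    let a := p.1
    let b := p.2
    let c := a * (b * 2 - a)
    let d := a * a + b * b
    if PySem.Int.mod n 2 = 0 then (c, d) else (d, c + d)
termination_by n.toNat
decreasing_by
  rw [PySem.Int.floordiv_eq_ediv_of_pos (by omega)]
  omega

-- ===== PORT B =====
-- the loop body of Source B (one fast-doubling step for bit i of m)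
def fibStep (m : Int) (ab : Int × Int) (i : Nat) : Int × Int :=
  let c := ab.1 * (2 * ab.2 - ab.1)
  let d := ab.1 * ab.1 + ab.2 * ab.2
  if PySem.Int.band (m >>> i) 1 ≠ 0 then (d, c + d) else (c, d)

def fib_pair_alt (n : Int) : Int × Int :=
  let m : Int := max n 0
  -- range(m.bit_length() - 1, -1, -1) visits the indices bl-1, …, 0
  (List.range (PySem.Int.bitLength m)).reverse.foldl (fibStep m) (0, 1)

-- ===== PRECONDITION & SPEC =====
-- Pre_ excludes n < 0, on which Python A recurses forever (RecursionError).
def Pre_fib_pair (n : Int) : Prop := 0 ≤ n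
instance (n : Int) : Decidable (Pre_fib_pair n) := by unfold Pre_fib_pair; infer_instance
def pvWitness_fib_pair : Int := 10

def Spec_fib_pair (n : Int) (out : Int × Int) : Prop := out = fib_pair_alt n
instance (n : Int) (out : Int × Int) : Decidable (Spec_fib_pair n out) := by unfold Spec_fib_pair; infer_instance

-- ===== CLAIM (what is proved, stated in full; the proofs are below) =====
def Claim_equal_fib_pair : Prop := ∀ (n : Int), Dom_fib_pair n → Pre_fib_pair n → Spec_fib_pair n (fib_pair n)

-- ===== LEMMAS AND PROOFS =====

-- the two fast-doubling identities, over Int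
lemma fib_double_c (v : Nat) :
    (Nat.fib v : Int) * (2 * (Nat.fib (v + 1) : Int) - (Nat.fib v : Int)) = (Nat.fib (2 * v) : Int) := by
  have hle : Nat.fib v ≤ 2 * Nat.fib (v + 1) := by
    have h1 : Nat.fib v ≤ Nat.fib (v + 1) := Nat.fib_mono (by omega)
    omega
  have h := Nat.fib_two_mul v
  have hc : ((Nat.fib (2 * v) : Int)) = (Nat.fib v : Int) * ((2 * Nat.fib (v + 1) - Nat.fib v : Nat) : Int) := by
    exact_mod_cast congrArg (Nat.cast : Nat → Int) h
  rw [hc, Int.ofNat_sub hle]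
  push_cast
  ring

lemma fib_double_d (v : Nat) :
    (Nat.fib v : Int) * (Nat.fib v : Int) + (Nat.fib (v + 1) : Int) * (Nat.fib (v + 1) : Int)
      = (Nat.fib (2 * v + 1) : Int) := by
  have h := Nat.fib_two_mul_add_one v
  have hc : ((Nat.fib (2 * v + 1) : Int)) = ((Nat.fib (v + 1) ^ 2 + Nat.fib v ^ 2 : Nat) : Int) := by
    exact_mod_cast congrArg (Nat.cast : Nat → Int) h
  rw [hc]
  push_cast
  ring

-- one doubling step of B, keyed by bit k of m
lemma fibStep_eq (m : Nat) (k : Nat) :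
    fibStep (m : Int) ((Nat.fib (m >>> (k + 1)) : Int), (Nat.fib (m >>> (k + 1) + 1) : Int)) k
      = ((Nat.fib (m >>> k) : Int), (Nat.fib (m >>> k + 1) : Int)) := by
  have hsh : ((m : Int) >>> k) = ((m >>> k : Nat) : Int) := by
    simp [Int.shiftRight_eq, Int.natCast_shiftRight]
  have hv : m >>> (k + 1) = (m >>> k) / 2 := Nat.shiftRight_succ m k
  have hband : PySem.Int.band ((m : Int) >>> k) 1 = ((m >>> k) % 2 : Nat) := by
    rw [hsh, show ((1 : Int)) = ((1 : Nat) : Int) from rfl, PySem.Int.band_natCast, Nat.and_one_is_mod]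
  rcases (by omega : m >>> k % 2 = 0 ∨ m >>> k % 2 = 1) with hpar | hpar
  · simp only [fibStep, hband, hv]
    rw [if_neg (by simp [hpar])]
    rw [fib_double_c, fib_double_d, show 2 * (m >>> k / 2) = m >>> k by omega]
  · simp only [fibStep, hband, hv]
    rw [if_pos (by simp [hpar])]
    refine Prod.ext ?_ ?_ <;> simp only
    · rw [fib_double_d, show 2 * (m >>> k / 2) + 1 = m >>> k by omega]
    · rw [fib_double_c, fib_double_d]
      have hfib : Nat.fib (m >>> k + 1) = Nat.fib (2 * (m >>> k / 2)) + Nat.fib (2 * (m >>> k / 2) + 1) := by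
        rw [show m >>> k + 1 = 2 * (m >>> k / 2) + 2 by omega, Nat.fib_add_two]
      rw [hfib]
      push_cast
      ring

-- loop invariant for B: after processing bits k-1 … 0 starting from (F(m>>>k), F(m>>>k+1)),
-- the state is (F(m), F(m+1))
lemma loop_inv (m : Nat) : ∀ k : Nat,
    (List.range k).reverse.foldl (fibStep (m : Int))
        ((Nat.fib (m >>> k) : Int), (Nat.fib (m >>> k + 1) : Int))
      = ((Nat.fib m : Int), (Nat.fib (m + 1) : Int)) := by
  intro k
  induction k with
  | zero => simp
  | succ k ih =>
    rw [List.range_succ, List.reverse_append]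
    simp only [List.reverse_singleton, List.singleton_append, List.foldl_cons]
    rw [fibStep_eq m k]
    exact ih

lemma alt_val (n : Int) : fib_pair_alt n = ((Nat.fib (max n 0).toNat : Int), (Nat.fib ((max n 0).toNat + 1) : Int)) := by
  have hm : (max n 0) = (((max n 0).toNat : Nat) : Int) := by omega
  set M : Nat := (max n 0).toNat with hM
  show (List.range (PySem.Int.bitLength (max n 0))).reverse.foldl (fibStep (max n 0)) (0, 1)
      = ((Nat.fib M : Int), (Nat.fib (M + 1) : Int))
  rw [hm]
  have hlt : M < 2 ^ PySem.Int.bitLength (M : Int) := by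
    have h := PySem.Int.lt_two_pow_bitLength (M : Int)
    simpa using h
  have htop : M >>> PySem.Int.bitLength (M : Int) = 0 := by
    rw [Nat.shiftRight_eq_div_pow]
    exact Nat.div_eq_of_lt hlt
  have hinv := loop_inv M (PySem.Int.bitLength (M : Int))
  rw [htop] at hinv
  simpa using hinv

lemma a_val : ∀ m : Nat, fib_pair (m : Int) = ((Nat.fib m : Int), (Nat.fib (m + 1) : Int)) := by
  intro m
  induction m using Nat.strong_induction_on with
  | _ m ih =>
    rw [fib_pair]
    by_cases h0 : m = 0
    · subst h0; simp
    · rw [dif_neg (by omega)]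
      have hdiv : PySem.Int.floordiv (m : Int) 2 = ((m / 2 : Nat) : Int) := by
        exact_mod_cast PySem.Int.floordiv_natCast m 2
      have hmod : PySem.Int.mod (m : Int) 2 = ((m % 2 : Nat) : Int) := by
        exact_mod_cast PySem.Int.mod_natCast m 2
      rw [hdiv, hmod, ih (m / 2) (by omega)]
      simp only
      rcases (by omega : m % 2 = 0 ∨ m % 2 = 1) with hpar | hpar
      · rw [if_pos (by simp [hpar])]
        refine Prod.ext ?_ ?_ <;> simp only
        · rw [show (Nat.fib (m / 2) : Int) * ((Nat.fib (m / 2 + 1) : Int) * 2 - (Nat.fib (m / 2) : Int))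
              = (Nat.fib (m / 2) : Int) * (2 * (Nat.fib (m / 2 + 1) : Int) - (Nat.fib (m / 2) : Int)) by ring,
            fib_double_c, show 2 * (m / 2) = m by omega]
        · rw [fib_double_d, show 2 * (m / 2) + 1 = m + 1 by omega]
      · rw [if_neg (by simp [hpar])]
        refine Prod.ext ?_ ?_ <;> simp only
        · rw [fib_double_d, show 2 * (m / 2) + 1 = m by omega]
        · rw [show (Nat.fib (m / 2) : Int) * ((Nat.fib (m / 2 + 1) : Int) * 2 - (Nat.fib (m / 2) : Int))
              = (Nat.fib (m / 2) : Int) * (2 * (Nat.fib (m / 2 + 1) : Int) - (Nat.fib (m / 2) : Int)) by ring,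
            fib_double_c, fib_double_d]
          have hfib : Nat.fib (m + 1) = Nat.fib (2 * (m / 2)) + Nat.fib (2 * (m / 2) + 1) := by
            rw [show m + 1 = 2 * (m / 2) + 2 by omega, Nat.fib_add_two]
          rw [hfib]
          push_cast
          ring

-- ===== VERDICT (by name: the statement is the Claim_ definition above) =====
theorem fib_pair_spec : Claim_equal_fib_pair := by
  intro n _ hpre
  have hp : (0 : Int) ≤ n := hpre
  unfold Spec_fib_pair
  rw [show n = ((n.toNat : Nat) : Int) by omega]
  rw [a_val, alt_val]
  simp
  exact ⟨by congr 1; omega, by congr 1; omega⟩
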